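-- pv_equiv track=rewrite | github.com/tsuru7/algorithm-study | AtCoder/ABC242/D-2.py | f
-- ===== SOURCE A (Python) =====
-- def f(t, k, s):
--     if t == 0:
--         return ord(s[k]) - ord('A')
--     if k == 0:
--         c = ord(s[0]) - ord('A')
--         c += t
--         c %= 3
--         return c
--     if k % 2 == 0:
--         c = f(t-1, k//2, s) + 1
--     else:
--         c = f(t-1, (k-1)//2, s) - 1
--     c %= 3
--     return c
-- ===== SOURCE B (Python) =====
-- def f(t, k, s):
--     if t == 0:
--         return ord(s[k]) - ord('A')
--     adj = 0
--     while t != 0 and k > 0: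
--         adj += 1 if k % 2 == 0 else -1
--         k //= 2
--         t -= 1
--     base = ord(s[k]) - ord('A') if t == 0 else ord(s[0]) - ord('A') + t
--     return (base + adj) % 3
-- ===== Notes on version B (the rewrite author's own statement) =====
-- stated objective: alternative
-- what changed: Replaces the t-deep recursion with step-by-step %3 by an iterative loop that accumulates the +/-1 adjustments (using that (k-1)//2 == k//2 for odd k, so both parity branches halve k) and applies a single final %3.
-- outside the precondition, e.g. on f(2, -1, 'ABC'): A returns 0, B returns 2
import Mathlib
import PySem

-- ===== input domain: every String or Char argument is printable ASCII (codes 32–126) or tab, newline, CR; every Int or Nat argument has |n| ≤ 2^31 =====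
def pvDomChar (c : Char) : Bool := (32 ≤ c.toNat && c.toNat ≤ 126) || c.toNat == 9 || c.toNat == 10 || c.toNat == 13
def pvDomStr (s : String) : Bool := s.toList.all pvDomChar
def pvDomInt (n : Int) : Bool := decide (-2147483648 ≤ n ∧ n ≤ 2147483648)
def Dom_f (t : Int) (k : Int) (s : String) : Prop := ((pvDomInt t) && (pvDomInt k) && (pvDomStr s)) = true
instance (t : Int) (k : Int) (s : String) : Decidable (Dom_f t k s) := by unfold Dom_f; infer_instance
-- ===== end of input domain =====

-- B replaces A's t-deep recursion (with a %3 at every level) by one loop that accumulates the ±1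
-- adjustments and takes a single final %3: an alternative decomposition, not claimed faster.

-- ===== PORT A =====
-- ord(s[i]) - ord('A'); out-of-range index (IndexError, excluded by Pre_f) yields the junk value 0
def chVal (s : String) (i : Int) : Int :=
  match PySem.Str.pyGet? s i with
  | some c => (c.toNat : Int) - 65
  | none => 0

def f (t : Int) (k : Int) (s : String) : Int :=
  if t = 0 then chVal s k
  else if k = 0 then PySem.Int.mod (chVal s 0 + t) 3
  else if 0 < k then
    if PySem.Int.mod k 2 = 0 then
      PySem.Int.mod (f (t - 1) (PySem.Int.floordiv k 2) s + 1) 3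
    else
      PySem.Int.mod (f (t - 1) (PySem.Int.floordiv (k - 1) 2) s - 1) 3
  else 0  -- k < 0 with t ≠ 0 is excluded by Pre_f (Python wraps indices or hits RecursionError); totality guard
termination_by k.toNat
decreasing_by
  · have h2 : PySem.Int.floordiv k 2 = k / 2 := PySem.Int.floordiv_eq_ediv_of_pos (by omega)
    rw [h2]; omega
  · have h2 : PySem.Int.floordiv (k - 1) 2 = (k - 1) / 2 := PySem.Int.floordiv_eq_ediv_of_pos (by omega)
    rw [h2]; omega

-- ===== PORT B =====
-- the while-loop of Source B: state (t, k, adj)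
def fLoop (t : Int) (k : Int) (adj : Int) : Int × Int × Int :=
  if t ≠ 0 ∧ 0 < k then
    fLoop (t - 1) (PySem.Int.floordiv k 2)
      (adj + if PySem.Int.mod k 2 = 0 then 1 else -1)
  else (t, k, adj)
termination_by k.toNat
decreasing_by
  have h2 : PySem.Int.floordiv k 2 = k / 2 := PySem.Int.floordiv_eq_ediv_of_pos (by omega)
  rw [h2]; omega

def f_alt (t : Int) (k : Int) (s : String) : Int :=
  if t = 0 then chVal s k
  else
    let r := fLoop t k 0
    let base := if r.1 = 0 then chVal s r.2.1 else chVal s 0 + r.1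
    PySem.Int.mod (base + r.2.2) 3

-- ===== PRECONDITION & SPEC =====
-- Pre_f = where Python A returns normally on its natural domain (k ≥ 0 when t ≠ 0): for t = 0 a
-- valid (possibly negative) index; for t ≠ 0 it excludes k < 0, where A's value (when t > 0) comes
-- from Python negative-index wraparound after repeated halvings — outside the problem's domain —
-- and where A hits RecursionError when t < 0; for t > 0 the final index k // 2^t must be in range.
def Pre_f (t : Int) (k : Int) (s : String) : Prop :=
  if t = 0 then PySem.Raise.InRange s.toList.length k
  else 0 ≤ k ∧ s ≠ "" ∧ (0 < t → k / 2 ^ t.toNat < (s.toList.length : Int))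
instance (t : Int) (k : Int) (s : String) : Decidable (Pre_f t k s) := by unfold Pre_f; infer_instance
def pvWitness_f : Int × Int × String := (3, 5, "ABC")

def Spec_f (t : Int) (k : Int) (s : String) (out : Int) : Prop := out = f_alt t k s
instance (t : Int) (k : Int) (s : String) (out : Int) : Decidable (Spec_f t k s out) := by unfold Spec_f; infer_instance

-- ===== CLAIM (what is proved, stated in full; the proofs are below) =====
def Claim_equal_f : Prop := ∀ (t : Int) (k : Int) (s : String), Dom_f t k s → Pre_f t k s → Spec_f t k s (f t k s)

-- ===== LEMMAS AND PROOFS =====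

-- shifting the accumulator of the loop
theorem fLoop_shift (n : Nat) (t k adj : Int) (hn : k.toNat = n) :
    fLoop t k adj = ((fLoop t k 0).1, (fLoop t k 0).2.1, adj + (fLoop t k 0).2.2) := by
  induction n using Nat.strong_induction_on generalizing t k adj with
  | _ n ih =>
    by_cases h : t ≠ 0 ∧ 0 < k
    · have h2 : PySem.Int.floordiv k 2 = k / 2 := PySem.Int.floordiv_eq_ediv_of_pos (by omega)
      have hlt : (k / 2).toNat < n := by omega
      have key : ∀ a : Int, fLoop (t - 1) (k / 2) a =
          ((fLoop (t - 1) (k / 2) 0).1, (fLoop (t - 1) (k / 2) 0).2.1,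
            a + (fLoop (t - 1) (k / 2) 0).2.2) := fun a => ih _ hlt (t - 1) (k / 2) a rfl
      rw [fLoop, if_pos h, h2, key]
      conv_rhs => rw [fLoop, if_pos h, h2, key]
      simp
      ring
    · rw [fLoop, if_neg h]
      conv_rhs => rw [fLoop, if_neg h]
      simp

-- A's recursion equals B's loop-then-single-mod, for t ≠ 0, 0 ≤ k
theorem f_eq_loop (n : Nat) (t k : Int) (s : String) (hn : k.toNat = n) (ht : t ≠ 0) (hk : 0 ≤ k) :
    f t k s = PySem.Int.mod
      ((if (fLoop t k 0).1 = 0 then chVal s (fLoop t k 0).2.1 else chVal s 0 + (fLoop t k 0).1)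
        + (fLoop t k 0).2.2) 3 := by
  induction n using Nat.strong_induction_on generalizing t k with
  | _ n ih =>
    by_cases hk0 : k = 0
    · subst hk0
      rw [fLoop]
      simp [f, ht]
    · have hkpos : 0 < k := by omega
      have hmod : PySem.Int.mod k 2 = k % 2 := PySem.Int.mod_eq_emod_of_pos (by omega)
      have hdiv : PySem.Int.floordiv k 2 = k / 2 := PySem.Int.floordiv_eq_ediv_of_pos (by omega)
      have hdiv' : PySem.Int.floordiv (k - 1) 2 = (k - 1) / 2 :=
        PySem.Int.floordiv_eq_ediv_of_pos (by omega)
      have hloop : fLoop t k 0 =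
          ((fLoop (t - 1) (k / 2) 0).1, (fLoop (t - 1) (k / 2) 0).2.1,
            (if k % 2 = 0 then (1 : Int) else -1) + (fLoop (t - 1) (k / 2) 0).2.2) := by
        rw [fLoop, if_pos ⟨ht, hkpos⟩, hmod, hdiv,
            fLoop_shift (k / 2).toNat (t - 1) (k / 2) _ rfl]
        simp
      have hodd : ¬ k % 2 = 0 → (k - 1) / 2 = k / 2 := by omega
      rw [f, if_neg ht, if_neg hk0, if_pos hkpos, hmod, hdiv, hdiv', hloop]
      by_cases ht1 : t - 1 = 0
      · have hinner : ∀ k' : Int, f 0 k' s = chVal s k' := by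
          intro k'; rw [f]; simp
        have hstop : ∀ k' : Int, fLoop 0 k' 0 = (0, k', 0) := by
          intro k'; rw [fLoop]; simp
        rw [ht1]
        by_cases hpar : k % 2 = 0
        · rw [if_pos hpar, if_pos hpar, hinner, hstop]
          simp
        · rw [if_neg hpar, if_neg hpar, hodd hpar, hinner, hstop]
          simp
          omega
      · have hlt : (k / 2).toNat < n := by omega
        have IH := ih _ hlt (t - 1) (k / 2) rfl ht1 (by omega)
        by_cases hpar : k % 2 = 0
        · rw [if_pos hpar, if_pos hpar, IH]
          simp only [PySem.Int.mod_eq_emod_of_pos (show (0:Int) < 3 by omega)]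
          omega
        · rw [if_neg hpar, if_neg hpar, hodd hpar, IH]
          simp only [PySem.Int.mod_eq_emod_of_pos (show (0:Int) < 3 by omega)]
          omega

-- ===== VERDICT (by name: the statement is the Claim_ definition above) =====
theorem f_spec : Claim_equal_f := by
  intro t k s _ hpre
  unfold Spec_f
  by_cases ht : t = 0
  · subst ht; rw [f, f_alt]; simp
  · have hk : 0 ≤ k := by
      unfold Pre_f at hpre; rw [if_neg ht] at hpre; exact hpre.1
    rw [f_alt]; simp only [ht, if_false]
    exact f_eq_loop k.toNat t k s rfl ht hk
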